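-- pv_equiv track=rewrite | github.com/habibahassanein/Internal-PM-Tool | app.py | _group_slack_by_channel_date
-- ===== SOURCE A (Python) =====
-- from typing import List
--
-- def _group_slack_by_channel_date(slack_results: List[dict]) -> dict:
--     grouped = {}
--     for m in slack_results or []:
--         channel = f"#{(m.get('channel') or 'unknown').lstrip('#')}"
--         date_str = m.get('date') or m.get('ts') or 'Unknown date'
--         date_key = date_str.split(' ')[0] if isinstance(date_str, str) else str(date_str)
--         text = (m.get('text') or '').strip().replace('\n', ' ')
--         if len(text) > 200:
--             text = text[:200] + '...'
--         grouped.setdefault(channel, {}).setdefault(date_key, []).append(text)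
--     for channel in grouped:
--         grouped[channel] = dict(sorted(grouped[channel].items()))
--     return dict(sorted(grouped.items()))
-- ===== SOURCE B (Python) =====
-- def _key(m):
--     channel = f"#{(m.get('channel') or 'unknown').lstrip('#')}"
--     date_str = m.get('date') or m.get('ts') or 'Unknown date'
--     date_key = date_str.split(' ')[0] if isinstance(date_str, str) else str(date_str)
--     text = (m.get('text') or '').strip().replace('\n', ' ')
--     if len(text) > 200:
--         text = text[:200] + '...'
--     return channel, date_key, text
--
--
-- def _group_slack_by_channel_date(slack_results):
--     triples = [_key(m) for m in (slack_results or [])]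
--     return {c: {k: [t for c2, k2, t in triples if c2 == c and k2 == k]
--                 for k in sorted({k2 for c2, k2, _ in triples if c2 == c})}
--             for c in sorted({c for c, _, _ in triples})}
-- ===== Notes on version B (the rewrite author's own statement) =====
-- stated objective: alternative
-- what changed: B maps each message to a (channel, date, text) triple once, then builds the nested result declaratively as a comprehension over the sorted set of channels and, per channel, the sorted set of dates with a filter collecting the texts in original order, instead of A's imperative setdefault-dict accumulation followed by sorting the dict items.
import Mathlib
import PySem

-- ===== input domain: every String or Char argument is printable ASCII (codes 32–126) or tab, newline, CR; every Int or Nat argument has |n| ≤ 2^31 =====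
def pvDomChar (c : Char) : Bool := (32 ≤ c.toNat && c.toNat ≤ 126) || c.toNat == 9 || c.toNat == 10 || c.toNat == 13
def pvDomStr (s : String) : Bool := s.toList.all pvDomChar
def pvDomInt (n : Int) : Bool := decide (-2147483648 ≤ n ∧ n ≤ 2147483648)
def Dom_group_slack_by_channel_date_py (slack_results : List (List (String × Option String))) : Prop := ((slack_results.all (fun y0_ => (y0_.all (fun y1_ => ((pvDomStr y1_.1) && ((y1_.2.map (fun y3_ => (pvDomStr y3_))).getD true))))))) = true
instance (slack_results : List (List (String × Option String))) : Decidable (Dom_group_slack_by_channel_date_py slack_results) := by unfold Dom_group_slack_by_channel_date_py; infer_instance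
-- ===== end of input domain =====

-- B reimplements the grouping as a declarative nested comprehension over sorted key sets instead of
-- A's mutating setdefault dict build followed by sorting; objective: alternative (not faster).

-- `x or y` on Optional[str] values: None and "" are falsy (shared transform semantics of both Pythons)
def pvTruthy (v : Option (Option String)) : Option String :=
  match v with
  | some (some s) => if s = "" then none else some s
  | _ => none

-- ===== PORT A =====
-- A's loop body, transliterated; notes on hand-ported pieces:
--   * m.get(k) is List.lookup k m (first match, per the dict convention)
--   * .lstrip('#') is dropWhile (· == '#') — exact for a single strip character
--   * date_str.split(' ')[0]: the list split? returns is always nonempty, so the [0] never raises;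
--     the `| _ => ""` arm is unreachable.  isinstance(date_str, str) is always true (values are Option[str]).
--   * text[:200] is List.take 200 (nonnegative slice)
def group_slack_by_channel_date_py (slack_results : List (List (String × Option String))) : List (String × List (String × List String)) :=
  let grouped : PySem.Dict String (PySem.Dict String (List String)) :=
    slack_results.foldl (fun g m =>
      let channel : String := String.ofList ('#' :: (((pvTruthy (List.lookup "channel" m)).getD "unknown").toList.dropWhile (fun c => c == '#')))
      let date_str : String := ((pvTruthy (List.lookup "date" m)).or (pvTruthy (List.lookup "ts" m))).getD "Unknown date"
      let date_key : String := match PySem.Str.split? date_str " " with | some (p :: _) => p | _ => ""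
      let text0 : List Char := PySem.Chars.replace (PySem.Chars.strip (((pvTruthy (List.lookup "text" m)).getD "").toList)) ['\n'] [' ']
      let text : String := String.ofList (if 200 < text0.length then text0.take 200 ++ ("...".toList) else text0)
      -- grouped.setdefault(channel, {}).setdefault(date_key, []).append(text) — the two in-place
      -- setdefault+mutate steps are exactly nested Dict.modify with the corresponding defaults
      g.modify channel PySem.Dict.empty (fun inner => inner.modify date_key [] (fun l => l ++ [text]))) PySem.Dict.empty
  -- for channel in grouped: grouped[channel] = dict(sorted(...)); return dict(sorted(grouped.items()))
  -- keys in a dict are unique, so Python's tuple comparison of items never reaches the value: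
  -- sorted(items) is sorted with key = first component
  PySem.List.sorted (grouped.items.map (fun p => (p.1, PySem.List.sorted p.2.items (fun q => q.1)))) (fun p => p.1)

-- ===== PORT B =====
-- B's copy of the `x or y` falsiness helper (None and "" are falsy)
def pvTruthyB (v : Option (Option String)) : Option String :=
  match v with
  | some (some s) => if s = "" then none else some s
  | _ => none

-- _key(m): the same per-message transform, as B's helper (same hand-ported pieces as noted above)
def pvKey (m : List (String × Option String)) : String × String × String :=
  let channel : String := String.ofList ('#' :: (((pvTruthyB (List.lookup "channel" m)).getD "unknown").toList.dropWhile (fun c => c == '#')))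
  let date_str : String := ((pvTruthyB (List.lookup "date" m)).or (pvTruthyB (List.lookup "ts" m))).getD "Unknown date"
  let date_key : String := match PySem.Str.split? date_str " " with | some (p :: _) => p | some [] => "" | none => ""
  let text0 : List Char := PySem.Chars.replace (PySem.Chars.strip (((pvTruthyB (List.lookup "text" m)).getD "").toList)) ['\n'] [' ']
  let text : String := String.ofList (if 200 < text0.length then text0.take 200 ++ ("...".toList) else text0)
  (channel, date_key, text)

def group_slack_by_channel_date_py_alt (slack_results : List (List (String × Option String))) : List (String × List (String × List String)) :=
  let triples := slack_results.map pvKey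
  (PySem.List.sorted (PySem.Set.ofList (triples.map (fun x => x.1))) (fun c => c)).map (fun c =>
    (c, (PySem.List.sorted (PySem.Set.ofList ((triples.filter (fun x => x.1 == c)).map (fun x => x.2.1))) (fun k => k)).map (fun k =>
      (k, (triples.filter (fun x => x.1 == c && x.2.1 == k)).map (fun x => x.2.2)))))

-- ===== PRECONDITION & SPEC =====
def Spec_group_slack_by_channel_date_py (slack_results : List (List (String × Option String))) (out : List (String × List (String × List String))) : Prop := out = group_slack_by_channel_date_py_alt slack_results
instance (slack_results : List (List (String × Option String))) (out : List (String × List (String × List String))) : Decidable (Spec_group_slack_by_channel_date_py slack_results out) := by unfold Spec_group_slack_by_channel_date_py; infer_instance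

-- ===== CLAIM (what is proved, stated in full; the proofs are below) =====
def Claim_equal_group_slack_by_channel_date_py : Prop := ∀ (slack_results : List (List (String × Option String))), Dom_group_slack_by_channel_date_py slack_results → Spec_group_slack_by_channel_date_py slack_results (group_slack_by_channel_date_py slack_results)

-- ===== LEMMAS AND PROOFS =====

-- the grouping step of A, phrased on the (channel, date, text) triple
def pvStep (g : PySem.Dict String (PySem.Dict String (List String))) (x : String × String × String) : PySem.Dict String (PySem.Dict String (List String)) :=
  g.modify x.1 PySem.Dict.empty (fun inner => inner.modify x.2.1 [] (fun l => l ++ [x.2.2]))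

-- the inner (per-channel) step
def pvInner (d : PySem.Dict String (List String)) (x : String × String × String) : PySem.Dict String (List String) :=
  d.modify x.2.1 [] (fun l => l ++ [x.2.2])

-- the two copies of the falsiness helper agree
theorem pvTruthy_eqB (v : Option (Option String)) : pvTruthy v = pvTruthyB v := by
  rcases v with _ | (_ | s) <;> rfl

-- the two renderings of date_str.split(' ')[0] agree
theorem pv_key_match (s : String) :
    (match PySem.Str.split? s " " with | some (p :: _) => p | _ => "")
      = (match PySem.Str.split? s " " with | some (p :: _) => p | some [] => "" | none => "") := by
  cases h : PySem.Str.split? s " " with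
  | none => rfl
  | some l => cases l <;> rfl

theorem pv_foldA_eq (sr : List (List (String × Option String))) (g : PySem.Dict String (PySem.Dict String (List String))) :
    sr.foldl (fun g m =>
      let channel : String := String.ofList ('#' :: (((pvTruthy (List.lookup "channel" m)).getD "unknown").toList.dropWhile (fun c => c == '#')))
      let date_str : String := ((pvTruthy (List.lookup "date" m)).or (pvTruthy (List.lookup "ts" m))).getD "Unknown date"
      let date_key : String := match PySem.Str.split? date_str " " with | some (p :: _) => p | _ => ""
      let text0 : List Char := PySem.Chars.replace (PySem.Chars.strip (((pvTruthy (List.lookup "text" m)).getD "").toList)) ['\n'] [' ']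
      let text : String := String.ofList (if 200 < text0.length then text0.take 200 ++ ("...".toList) else text0)
      g.modify channel PySem.Dict.empty (fun inner => inner.modify date_key [] (fun l => l ++ [text]))) g
      = (sr.map pvKey).foldl pvStep g := by
  rw [List.foldl_map]
  congr 1
  funext g m
  dsimp only [pvStep, pvKey]
  rw [pv_key_match]
  simp only [pvTruthy_eqB]

theorem pv_getD_outer (ts : List (String × String × String)) (c : String) (g : PySem.Dict String (PySem.Dict String (List String))) :
    (ts.foldl pvStep g).getD c PySem.Dict.empty
      = (ts.filter (fun x => x.1 == c)).foldl pvInner (g.getD c PySem.Dict.empty) := by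
  induction ts generalizing g with
  | nil => rfl
  | cons x ts ih =>
    simp only [List.foldl_cons, List.filter_cons]
    by_cases h : x.1 = c
    · subst h
      simp [ih, pvStep, pvInner]
    · have hb : (x.1 == c) = false := by simp [h]
      simp [hb, ih, pvStep, PySem.Dict.getD_modify, Ne.symm h]

theorem pv_inner_as_std (l : List (String × String × String)) (d : PySem.Dict String (List String)) :
    l.foldl pvInner d = (l.map (fun x => x.2)).foldl (fun d p => d.modify p.1 [] (fun v => v ++ [p.2])) d := by
  rw [List.foldl_map]; rfl

theorem pv_texts_eq (ts : List (String × String × String)) (c k : String) :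
    (((ts.filter (fun x => x.1 == c)).map (fun x => x.2)).filter (fun p => p.1 == k)).map (fun p => p.2)
      = (ts.filter (fun x => x.1 == c && x.2.1 == k)).map (fun x => x.2.2) := by
  rw [List.filter_map, List.map_map, List.filter_filter]
  refine congrArg (List.map _) ?_
  exact List.filter_congr (fun a _ => by simp [Bool.and_comm])

-- one level of the result: a grouping dict with Nodup keys, its items sorted by key, equals
-- the map of the value function over its sorted key set
theorem pv_sorted_items_eq {ν : Type} [Inhabited ν] (d : PySem.Dict String ν) (ks : List String) (f : String → ν)
    (hk : d.keys = PySem.Set.ofList ks) (hv : ∀ c ∈ ks, d.getD c default = f c) :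
    PySem.List.sorted d.items (fun p => p.1)
      = (PySem.List.sorted (PySem.Set.ofList ks) (fun c => c)).map (fun c => (c, f c)) := by
  have hnd : d.keys.Nodup := by rw [hk]; exact PySem.Set.nodup_ofList ks
  apply PySem.List.sorted_eq_of_perm_of_pairwise_lt
  · have h1 : d.items = d.keys.map (fun c => (c, d.getD c default)) :=
      PySem.Dict.items_eq_map_keys d hnd default
    rw [h1, hk]
    have hmc : ∀ c ∈ PySem.List.sorted (PySem.Set.ofList ks) (fun c => c),
        (fun c => (c, f c)) c = (fun c => (c, d.getD c default)) c := by
      intro c hc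
      have hcks : c ∈ ks := by
        simpa [PySem.List.mem_sorted, PySem.Set.mem_ofList] using hc
      simp [hv c hcks]
    rw [List.map_congr_left hmc]
    exact (PySem.List.sorted_perm (PySem.Set.ofList ks) (fun c => c) false).map _
  · have := PySem.List.sorted_ofList_pairwise_lt ks
    exact List.Pairwise.map _ (by intro a b h; exact h) this

-- ===== VERDICT (by name: the statement is the Claim_ definition above) =====
theorem group_slack_by_channel_date_py_spec : Claim_equal_group_slack_by_channel_date_py := by
  intro sr _
  show group_slack_by_channel_date_py sr = group_slack_by_channel_date_py_alt sr
  unfold group_slack_by_channel_date_py group_slack_by_channel_date_py_alt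
  dsimp only []
  rw [pv_foldA_eq]
  set ts := sr.map pvKey with hts
  set G := ts.foldl pvStep PySem.Dict.empty with hG
  have hkeys : G.keys = PySem.Set.ofList (ts.map (fun x => x.1)) := by
    rw [hG]
    have := PySem.Dict.keys_foldl_modify_key ts (fun x => x.1) PySem.Dict.empty
      (fun _ x inner => inner.modify x.2.1 [] (fun l => l ++ [x.2.2])) PySem.Dict.empty
    simpa [pvStep, PySem.Set.update_nil_left] using this
  have hnd : G.keys.Nodup := by rw [hkeys]; exact PySem.Set.nodup_ofList _
  -- inner dict at channel c
  have hinner : ∀ c, G.getD c PySem.Dict.empty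
      = ((ts.filter (fun x => x.1 == c)).map (fun x => x.2)).foldl
          (fun d p => d.modify p.1 [] (fun v => v ++ [p.2])) PySem.Dict.empty := by
    intro c
    rw [hG, pv_getD_outer, PySem.Dict.getD_empty, pv_inner_as_std]
  -- per-channel sorted items
  have hinner_sorted : ∀ c,
      PySem.List.sorted (G.getD c PySem.Dict.empty).items (fun q => q.1)
        = (PySem.List.sorted (PySem.Set.ofList ((ts.filter (fun x => x.1 == c)).map (fun x => x.2.1))) (fun k => k)).map
            (fun k => (k, (ts.filter (fun x => x.1 == c && x.2.1 == k)).map (fun x => x.2.2))) := by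
    intro c
    apply pv_sorted_items_eq
    · rw [hinner]
      have := PySem.Dict.keys_foldl_modify_key ((ts.filter (fun x => x.1 == c)).map (fun x => x.2))
        (fun p => p.1) ([] : List String) (fun _ p v => v ++ [p.2]) PySem.Dict.empty
      simpa [PySem.Set.update_nil_left, List.map_map, Function.comp] using this
    · intro k _
      rw [hinner]
      have := PySem.Dict.getD_foldl_modify_append ((ts.filter (fun x => x.1 == c)).map (fun x => x.2))
        PySem.Dict.empty k
      simp only [PySem.Dict.getD_empty, List.nil_append] at this
      show _ = (ts.filter (fun x => x.1 == c && x.2.1 == k)).map (fun x => x.2.2)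
      rw [← pv_texts_eq]
      exact this
  -- outer level
  have houter : G.items.map (fun p => (p.1, PySem.List.sorted p.2.items (fun q => q.1)))
      = G.keys.map (fun c => (c, PySem.List.sorted (G.getD c PySem.Dict.empty).items (fun q => q.1))) := by
    rw [PySem.Dict.items_eq_map_keys G hnd PySem.Dict.empty, List.map_map]
    rfl
  rw [houter, hkeys]
  apply PySem.List.sorted_eq_of_perm_of_pairwise_lt
  · have hmc : ∀ c ∈ PySem.List.sorted (PySem.Set.ofList (ts.map (fun x => x.1))) (fun c => c),
        (fun c => (c, (PySem.List.sorted (PySem.Set.ofList ((ts.filter (fun x => x.1 == c)).map (fun x => x.2.1))) (fun k => k)).map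
            (fun k => (k, (ts.filter (fun x => x.1 == c && x.2.1 == k)).map (fun x => x.2.2))))) c
          = (fun c => (c, PySem.List.sorted (G.getD c PySem.Dict.empty).items (fun q => q.1))) c := by
      intro c _
      simp [hinner_sorted c]
    rw [List.map_congr_left hmc]
    exact (PySem.List.sorted_perm _ _ false).map _
  · have := PySem.List.sorted_ofList_pairwise_lt (ts.map (fun x => x.1))
    exact List.Pairwise.map _ (by intro a b h; exact h) this
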